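-- pv_equiv track=rewrite | github.com/tobiasspt/advent_of_code | 2024/Day20/day20.py | get_tiles_within_distance
-- ===== SOURCE A (Python) =====
-- def get_tiles_within_distance(pos: tuple[int,int], max_distance: int, size: tuple[int,int]) -> tuple[list[tuple[int,int]], list[int]]:
--     px, py = pos
--     sx, sy = size
--     xy_candidates = []
--     xy_distances = []
--
--     for x in range(-max_distance, max_distance+1):
--         for y in range(-max_distance, max_distance+1):
--             distance = abs(x)+abs(y)
--             if 2 <= distance <= max_distance:
--                 xy_candidates.append((px+x, py+y))
--                 xy_distances.append(distance)
--     neighs = []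
--     n_dist = []
--     for n, d in zip(xy_candidates, xy_distances):
--         nx, ny = n
--         if 0 <= nx <= sx-1:
--             if 0 <= ny <= sy-1:
--                 neighs.append(n)
--                 n_dist.append(d)
--     return neighs, n_dist
-- ===== SOURCE B (Python) =====
-- def get_tiles_within_distance(pos: tuple[int, int], max_distance: int, size: tuple[int, int]) -> tuple[list[tuple[int, int]], list[int]]:
--     px, py = pos
--     sx, sy = size
--     neighs = []
--     n_dist = []
--     for x in range(-max_distance, max_distance + 1):
--         if not (0 <= px + x <= sx - 1):
--             continue
--         ax = -x if x < 0 else x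
--         rem = max_distance - ax
--         lo = 2 - ax if ax < 2 else 0
--         ylow = max(-rem, -py)
--         yhigh = min(rem, sy - 1 - py)
--         if lo == 0:
--             # whole interval [ylow, yhigh] is valid; no per-tile test needed
--             for y in range(ylow, yhigh + 1):
--                 neighs.append((px + x, py + y))
--                 n_dist.append(ax + (y if y >= 0 else -y))
--         else:
--             # two interval segments: y <= -lo and y >= lo
--             for y in range(ylow, min(-lo, yhigh) + 1):
--                 neighs.append((px + x, py + y))
--                 n_dist.append(ax - y)
--             for y in range(max(lo, ylow), yhigh + 1):
--                 neighs.append((px + x, py + y))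
--                 n_dist.append(ax + y)
--     return neighs, n_dist
-- ===== Notes on version B (the rewrite author's own statement) =====
-- stated objective: alternative
-- what changed: B replaces A's full-square scan with per-tile distance and bounds tests (plus a second zip-filter pass) by per-column interval arithmetic: it intersects the y-interval with the grid bounds and the diamond and emits one or two contiguous range segments per column with no per-tile test.
import Mathlib
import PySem

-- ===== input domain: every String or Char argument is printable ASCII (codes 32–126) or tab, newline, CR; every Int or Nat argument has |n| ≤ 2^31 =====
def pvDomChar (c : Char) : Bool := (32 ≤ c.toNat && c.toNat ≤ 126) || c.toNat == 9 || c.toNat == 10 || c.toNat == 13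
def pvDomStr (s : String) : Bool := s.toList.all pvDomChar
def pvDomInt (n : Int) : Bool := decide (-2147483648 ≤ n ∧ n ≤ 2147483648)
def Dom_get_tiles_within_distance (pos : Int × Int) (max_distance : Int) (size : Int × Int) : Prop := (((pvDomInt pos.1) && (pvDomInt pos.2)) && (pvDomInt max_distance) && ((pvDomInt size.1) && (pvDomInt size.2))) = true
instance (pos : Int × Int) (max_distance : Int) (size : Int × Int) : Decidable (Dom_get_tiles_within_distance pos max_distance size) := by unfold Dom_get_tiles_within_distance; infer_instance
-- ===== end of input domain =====

-- B replaces A's square-scan-with-per-tile-tests (plus a second filtering pass) by direct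
-- interval arithmetic: per column it intersects the y-interval with the grid bounds and emits
-- one or two contiguous range segments with no per-tile test.

-- ===== PORT A =====
def get_tiles_within_distance (pos : Int × Int) (max_distance : Int) (size : Int × Int) : (List (Int × Int)) × List Int :=
  let px := pos.1; let py := pos.2
  let sx := size.1; let sy := size.2
  -- first loop: build candidate positions and distances over the full square
  let cand : (List (Int × Int)) × List Int :=
    (PySem.List.pyRange (-max_distance) (max_distance+1) 1).foldl (fun acc x =>
      (PySem.List.pyRange (-max_distance) (max_distance+1) 1).foldl (fun acc y =>
        let distance := |x| + |y|
        if 2 ≤ distance ∧ distance ≤ max_distance then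
          (acc.1 ++ [(px+x, py+y)], acc.2 ++ [distance])
        else acc) acc) ([], [])
  -- second loop: filter zipped candidates by grid bounds
  (cand.1.zip cand.2).foldl (fun acc nd =>
    if 0 ≤ nd.1.1 ∧ nd.1.1 ≤ sx - 1 then
      if 0 ≤ nd.1.2 ∧ nd.1.2 ≤ sy - 1 then
        (acc.1 ++ [nd.1], acc.2 ++ [nd.2])
      else acc
    else acc) ([], [])

-- ===== PORT B =====
def get_tiles_within_distance_alt (pos : Int × Int) (max_distance : Int) (size : Int × Int) : (List (Int × Int)) × List Int :=
  let px := pos.1; let py := pos.2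
  let sx := size.1; let sy := size.2
  (PySem.List.pyRange (-max_distance) (max_distance+1) 1).foldl (fun acc x =>
    if ¬ (0 ≤ px + x ∧ px + x ≤ sx - 1) then acc    -- continue
    else
      let ax := if x < 0 then -x else x
      let rem := max_distance - ax
      let lo := if ax < 2 then 2 - ax else 0
      let ylow := max (-rem) (-py)
      let yhigh := min rem (sy - 1 - py)
      if lo = 0 then
        -- whole interval [ylow, yhigh] is valid; no per-tile test
        (PySem.List.pyRange ylow (yhigh+1) 1).foldl (fun acc y =>
          (acc.1 ++ [(px+x, py+y)], acc.2 ++ [ax + (if 0 ≤ y then y else -y)])) acc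
      else
        -- two interval segments: y ≤ -lo and y ≥ lo
        let acc1 := (PySem.List.pyRange ylow (min (-lo) yhigh + 1) 1).foldl (fun acc y =>
          (acc.1 ++ [(px+x, py+y)], acc.2 ++ [ax - y])) acc
        (PySem.List.pyRange (max lo ylow) (yhigh+1) 1).foldl (fun acc y =>
          (acc.1 ++ [(px+x, py+y)], acc.2 ++ [ax + y])) acc1) ([], [])

-- ===== PRECONDITION & SPEC =====
def Spec_get_tiles_within_distance (pos : Int × Int) (max_distance : Int) (size : Int × Int) (out : (List (Int × Int)) × List Int) : Prop := out = get_tiles_within_distance_alt pos max_distance size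
instance (pos : Int × Int) (max_distance : Int) (size : Int × Int) (out : (List (Int × Int)) × List Int) : Decidable (Spec_get_tiles_within_distance pos max_distance size out) := by unfold Spec_get_tiles_within_distance; infer_instance

-- ===== CLAIM (what is proved, stated in full; the proofs are below) =====
def Claim_equal_get_tiles_within_distance : Prop := ∀ (pos : Int × Int) (max_distance : Int) (size : Int × Int), Dom_get_tiles_within_distance pos max_distance size → Spec_get_tiles_within_distance pos max_distance size (get_tiles_within_distance pos max_distance size)

-- ===== LEMMAS AND PROOFS =====

-- A fold that conditionally appends one element to each component of a pair state
-- produces the filtered-and-mapped lists.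
theorem pvFoldPairFilter {α β γ : Type} (p : α → Prop) [DecidablePred p]
    (f : α → β) (g : α → γ) (l : List α) (acc : List β × List γ) :
    l.foldl (fun s x => if p x then (s.1 ++ [f x], s.2 ++ [g x]) else s) acc
      = (acc.1 ++ ((l.filter (fun x => decide (p x))).map f),
         acc.2 ++ ((l.filter (fun x => decide (p x))).map g)) := by
  induction l generalizing acc with
  | nil => simp
  | cons a t ih =>
    by_cases h : p a <;> simp [h, ih]

-- A fold that unconditionally appends one element to each component is the two maps.
theorem pvFoldPairMap {α β γ : Type} (f : α → β) (g : α → γ) (l : List α) (acc : List β × List γ) :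
    l.foldl (fun s x => (s.1 ++ [f x], s.2 ++ [g x])) acc = (acc.1 ++ l.map f, acc.2 ++ l.map g) := by
  induction l generalizing acc with
  | nil => simp
  | cons a t ih => simp [ih]

-- An outer fold whose step appends per-element blocks to both components is a flatMap.
theorem pvFoldPairFlat {α β γ : Type} (u : α → List β) (v : α → List γ)
    (step : (List β × List γ) → α → (List β × List γ))
    (hstep : ∀ s x, step s x = (s.1 ++ u x, s.2 ++ v x))
    (l : List α) (acc : List β × List γ) :
    l.foldl step acc = (acc.1 ++ l.flatMap u, acc.2 ++ l.flatMap v) := by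
  induction l generalizing acc with
  | nil => simp
  | cons a t ih => simp [hstep, ih]

-- Filtering an integer range by an interval condition is the clamped sub-range.
theorem pvIntervalFilter (c d : Int) : ∀ (n : ℕ) (a b : Int), (b - a).toNat = n →
    (PySem.List.pyRange a b 1).filter (fun y => decide (c ≤ y ∧ y < d))
      = PySem.List.pyRange (max a c) (min b d) 1 := by
  intro n
  induction n with
  | zero =>
    intro a b h
    rw [PySem.List.pyRange_one_eq_nil (by omega), PySem.List.pyRange_one_eq_nil (by omega)]
    rfl
  | succ n ih =>
    intro a b h
    have hab : a < b := by omega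
    rw [PySem.List.pyRange_one_cons hab, List.filter_cons]
    by_cases hc : c ≤ a ∧ a < d
    · rw [if_pos (by simpa using hc), ih (a+1) b (by omega)]
      have h1 : max a c = a := by omega
      have h2 : max (a+1) c = a+1 := by omega
      rw [h1, h2, PySem.List.pyRange_one_cons (by omega : a < min b d)]
    · rw [if_neg (by simpa using hc), ih (a+1) b (by omega)]
      rcases not_and_or.mp hc with h1 | h2
      · have : max (a+1) c = max a c := by omega
        rw [this]
      · rw [not_lt] at h2
        rw [PySem.List.pyRange_one_eq_nil (by omega), PySem.List.pyRange_one_eq_nil (by omega)]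

theorem get_tiles_within_distance_eq (pos : Int × Int) (max_distance : Int) (size : Int × Int) :
    get_tiles_within_distance pos max_distance size = get_tiles_within_distance_alt pos max_distance size := by
  obtain ⟨px, py⟩ := pos
  obtain ⟨sx, sy⟩ := size
  set m := max_distance with hm
  unfold get_tiles_within_distance get_tiles_within_distance_alt
  simp only
  set pf : Int → Int → (Int × Int) × Int := fun x y => ((px + x, py + y), |x| + |y|) with hpf
  set R : List Int := PySem.List.pyRange (-m) (m+1) 1 with hR
  -- characterise A's first loop
  have hInnerA : ∀ (x : Int) (acc : (List (Int × Int)) × List Int),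
      R.foldl (fun acc y =>
        if 2 ≤ |x| + |y| ∧ |x| + |y| ≤ m then (acc.1 ++ [(px+x, py+y)], acc.2 ++ [|x| + |y|]) else acc) acc
      = (acc.1 ++ ((R.filter (fun y => decide (2 ≤ |x| + |y| ∧ |x| + |y| ≤ m))).map (fun y => (pf x y).1)),
         acc.2 ++ ((R.filter (fun y => decide (2 ≤ |x| + |y| ∧ |x| + |y| ≤ m))).map (fun y => (pf x y).2))) := by
    intro x acc
    exact pvFoldPairFilter (fun y => 2 ≤ |x| + |y| ∧ |x| + |y| ≤ m)
      (fun y => (pf x y).1) (fun y => (pf x y).2) R acc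
  set LA : List ((Int × Int) × Int) :=
    R.flatMap (fun x => (R.filter (fun y => decide (2 ≤ |x| + |y| ∧ |x| + |y| ≤ m))).map (pf x)) with hLA
  have hcandA :
      R.foldl (fun acc x =>
        R.foldl (fun acc y =>
          if 2 ≤ |x| + |y| ∧ |x| + |y| ≤ m then (acc.1 ++ [(px+x, py+y)], acc.2 ++ [|x| + |y|]) else acc) acc)
        ([], [])
      = (LA.map Prod.fst, LA.map Prod.snd) := by
    rw [pvFoldPairFlat
      (u := fun x => (R.filter (fun y => decide (2 ≤ |x| + |y| ∧ |x| + |y| ≤ m))).map (fun y => (pf x y).1))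
      (v := fun x => (R.filter (fun y => decide (2 ≤ |x| + |y| ∧ |x| + |y| ≤ m))).map (fun y => (pf x y).2))
      (hstep := fun s x => hInnerA x s)]
    simp [hLA, List.map_flatMap, Function.comp_def]
  rw [hcandA]
  have hzip : (LA.map Prod.fst).zip (LA.map Prod.snd) = LA := by
    rw [List.zip_map']
    simp
  simp only [hzip]
  -- A's second loop: a single-condition filter fold
  have hstep2 : (fun (acc : (List (Int × Int)) × List Int) (nd : (Int × Int) × Int) =>
      if 0 ≤ nd.1.1 ∧ nd.1.1 ≤ sx - 1 then
        if 0 ≤ nd.1.2 ∧ nd.1.2 ≤ sy - 1 then (acc.1 ++ [nd.1], acc.2 ++ [nd.2]) else acc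
      else acc)
      = (fun acc nd =>
        if (0 ≤ nd.1.1 ∧ nd.1.1 ≤ sx - 1) ∧ (0 ≤ nd.1.2 ∧ nd.1.2 ≤ sy - 1) then
          (acc.1 ++ [nd.1], acc.2 ++ [nd.2]) else acc) := by
    funext acc nd
    split_ifs with h1 h2 h3 h4 h5 <;> first | rfl | (exfalso; tauto)
  rw [hstep2, pvFoldPairFilter
      (fun nd : (Int × Int) × Int => (0 ≤ nd.1.1 ∧ nd.1.1 ≤ sx - 1) ∧ (0 ≤ nd.1.2 ∧ nd.1.2 ≤ sy - 1))
      Prod.fst Prod.snd LA ([], [])]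
  -- B's per-column block, written with |x| and interval arithmetic
  set Bblock : Int → List ((Int × Int) × Int) := fun x =>
    if (0 ≤ px + x ∧ px + x ≤ sx - 1) then
      (if (if |x| < 2 then 2 - |x| else 0) = 0 then
        (PySem.List.pyRange (max (-(m - |x|)) (-py)) ((min (m - |x|) (sy - 1 - py))+1) 1).map
          (fun y => ((px+x, py+y), |x| + (if 0 ≤ y then y else -y)))
      else
        (PySem.List.pyRange (max (-(m - |x|)) (-py)) (min (-(if |x| < 2 then 2 - |x| else 0)) (min (m - |x|) (sy - 1 - py)) + 1) 1).map
          (fun y => ((px+x, py+y), |x| - y))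
        ++ (PySem.List.pyRange (max (if |x| < 2 then 2 - |x| else 0) (max (-(m - |x|)) (-py))) ((min (m - |x|) (sy - 1 - py))+1) 1).map
          (fun y => ((px+x, py+y), |x| + y)))
    else [] with hBblock
  -- B's fold equals the flatMap over Bblock
  have haxe : ∀ x : Int, (if x < 0 then -x else x) = |x| := by
    intro x
    rcases lt_or_ge x 0 with h | h
    · rw [if_pos h, abs_of_neg h]
    · rw [if_neg (by omega), abs_of_nonneg h]
  have hB :
      R.foldl (fun acc x =>
        if ¬ (0 ≤ px + x ∧ px + x ≤ sx - 1) then acc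
        else
          let ax := if x < 0 then -x else x
          let rem := m - ax
          let lo := if ax < 2 then 2 - ax else 0
          let ylow := max (-rem) (-py)
          let yhigh := min rem (sy - 1 - py)
          if lo = 0 then
            (PySem.List.pyRange ylow (yhigh+1) 1).foldl (fun acc y =>
              (acc.1 ++ [(px+x, py+y)], acc.2 ++ [ax + (if 0 ≤ y then y else -y)])) acc
          else
            let acc1 := (PySem.List.pyRange ylow (min (-lo) yhigh + 1) 1).foldl (fun acc y =>
              (acc.1 ++ [(px+x, py+y)], acc.2 ++ [ax - y])) acc
            (PySem.List.pyRange (max lo ylow) (yhigh+1) 1).foldl (fun acc y =>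
              (acc.1 ++ [(px+x, py+y)], acc.2 ++ [ax + y])) acc1) ([], [])
      = (R.flatMap (fun x => (Bblock x).map Prod.fst), R.flatMap (fun x => (Bblock x).map Prod.snd)) := by
    rw [pvFoldPairFlat (u := fun x => (Bblock x).map Prod.fst) (v := fun x => (Bblock x).map Prod.snd)
      (hstep := ?_)]
    · simp
    · intro s x
      simp only [haxe, hBblock]
      by_cases hxok : (0 ≤ px + x ∧ px + x ≤ sx - 1)
      · rw [if_neg (by simpa using hxok), if_pos hxok]
        by_cases hlo : (if |x| < 2 then 2 - |x| else 0) = 0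
        · rw [if_pos hlo, if_pos hlo, pvFoldPairMap]
          simp [List.map_map, Function.comp_def]
        · rw [if_neg hlo, if_neg hlo, pvFoldPairMap, pvFoldPairMap]
          simp [List.map_map, Function.comp_def, List.append_assoc]
      · rw [if_pos (by simpa using hxok), if_neg hxok]
        simp
  rw [hB]
  -- remaining goal: filtered LA projections equal B's flatMap projections
  suffices hLL : LA.filter (fun nd => decide ((0 ≤ nd.1.1 ∧ nd.1.1 ≤ sx - 1) ∧ (0 ≤ nd.1.2 ∧ nd.1.2 ≤ sy - 1))) = R.flatMap Bblock by
    rw [hLL]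
    simp [List.map_flatMap]
  rw [hLA, List.filter_flatMap]
  apply List.flatMap_congr
  intro x hx
  rw [hR, PySem.List.mem_pyRange_one] at hx
  have habs : |x| ≤ m := abs_le.mpr ⟨hx.1, by omega⟩
  have hax0 : 0 ≤ |x| := abs_nonneg x
  rw [List.filter_map, List.filter_filter]
  simp only [Function.comp_def]
  by_cases hxok : (0 ≤ px + x ∧ px + x ≤ sx - 1)
  · by_cases h2 : |x| < 2
    · -- lo = 2 - |x| ≥ 1: two segments
      have hlo : ¬ ((if |x| < 2 then 2 - |x| else 0) = 0) := by
        rw [if_pos h2]; omega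
      rw [hBblock]
      simp only [if_pos hxok, if_pos h2]
      rw [if_neg (sub_ne_zero_of_ne (ne_of_gt h2))]
      have hsplit : R = PySem.List.pyRange (-m) 0 1 ++ PySem.List.pyRange 0 (m+1) 1 := by
        rw [hR]; exact PySem.List.pyRange_one_append (-m) 0 (m+1) (by omega) (by omega)
      rw [hsplit, List.filter_append, List.map_append]
      congr 1
      · -- negative segment
        have hcong : (PySem.List.pyRange (-m) 0 1).filter
            (fun y => decide ((0 ≤ (pf x y).1.1 ∧ (pf x y).1.1 ≤ sx - 1) ∧ (0 ≤ (pf x y).1.2 ∧ (pf x y).1.2 ≤ sy - 1)) &&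
              decide (2 ≤ |x| + |y| ∧ |x| + |y| ≤ m))
            = (PySem.List.pyRange (-m) 0 1).filter
              (fun y => decide (max (-(m - |x|)) (-py) ≤ y ∧ y < min (-(2 - |x|)) (min (m - |x|) (sy - 1 - py)) + 1)) := by
          apply List.filter_congr
          intro y hy
          rw [PySem.List.mem_pyRange_one] at hy
          rw [hpf]
          simp only [← Bool.decide_and, decide_eq_decide]
          have hyneg : |y| = -y := abs_of_neg (by omega)
          constructor
          · rintro ⟨⟨⟨b1, b2⟩, b3, b4⟩, hd2, hdm⟩
            omega
          · rintro ⟨hl, hr⟩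
            omega
        rw [hcong, pvIntervalFilter _ _ _ (-m) 0 rfl]
        have he1 : max (-m) (max (-(m - |x|)) (-py)) = max (-(m - |x|)) (-py) := by omega
        have he2 : min 0 (min (-(2 - |x|)) (min (m - |x|) (sy - 1 - py)) + 1)
            = min (-(2 - |x|)) (min (m - |x|) (sy - 1 - py)) + 1 := by omega
        rw [he1, he2]
        apply List.map_congr_left
        intro y hy
        rw [PySem.List.mem_pyRange_one] at hy
        rw [hpf]
        simp only
        have : |y| = -y := abs_of_neg (by omega)
        rw [this]
        ring_nf
      · -- positive segment
        have hcong : (PySem.List.pyRange 0 (m+1) 1).filter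
            (fun y => decide ((0 ≤ (pf x y).1.1 ∧ (pf x y).1.1 ≤ sx - 1) ∧ (0 ≤ (pf x y).1.2 ∧ (pf x y).1.2 ≤ sy - 1)) &&
              decide (2 ≤ |x| + |y| ∧ |x| + |y| ≤ m))
            = (PySem.List.pyRange 0 (m+1) 1).filter
              (fun y => decide (max (2 - |x|) (max (-(m - |x|)) (-py)) ≤ y ∧ y < min (m - |x|) (sy - 1 - py) + 1)) := by
          apply List.filter_congr
          intro y hy
          rw [PySem.List.mem_pyRange_one] at hy
          rw [hpf]
          simp only [← Bool.decide_and, decide_eq_decide]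
          have hypos : |y| = y := abs_of_nonneg (by omega)
          constructor
          · rintro ⟨⟨⟨b1, b2⟩, b3, b4⟩, hd2, hdm⟩
            omega
          · rintro ⟨hl, hr⟩
            omega
        rw [hcong, pvIntervalFilter _ _ _ 0 (m+1) rfl]
        have he1 : max 0 (max (2 - |x|) (max (-(m - |x|)) (-py))) = max (2 - |x|) (max (-(m - |x|)) (-py)) := by omega
        have he2 : min (m+1) (min (m - |x|) (sy - 1 - py) + 1) = min (m - |x|) (sy - 1 - py) + 1 := by omega
        rw [he1, he2]
        apply List.map_congr_left
        intro y hy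
        rw [PySem.List.mem_pyRange_one] at hy
        rw [hpf]
        simp only
        have : |y| = y := abs_of_nonneg (by omega)
        rw [this]
    · -- lo = 0: single segment, no distance test needed
      have hlo : (if |x| < 2 then 2 - |x| else 0) = 0 := by rw [if_neg h2]
      rw [hBblock]
      simp only [if_pos hxok, hlo]
      have hcong : R.filter
          (fun y => decide ((0 ≤ (pf x y).1.1 ∧ (pf x y).1.1 ≤ sx - 1) ∧ (0 ≤ (pf x y).1.2 ∧ (pf x y).1.2 ≤ sy - 1)) &&
            decide (2 ≤ |x| + |y| ∧ |x| + |y| ≤ m))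
          = R.filter (fun y => decide (max (-(m - |x|)) (-py) ≤ y ∧ y < min (m - |x|) (sy - 1 - py) + 1)) := by
        apply List.filter_congr
        intro y hy
        rw [hR, PySem.List.mem_pyRange_one] at hy
        rw [hpf]
        simp only [← Bool.decide_and, decide_eq_decide]
        rcases abs_cases y with ⟨hy1, hy2⟩ | ⟨hy1, hy2⟩ <;>
          (constructor
           · rintro ⟨⟨⟨b1, b2⟩, b3, b4⟩, hd2, hdm⟩
             omega
           · rintro ⟨hl, hr⟩
             omega)
      rw [hcong, hR, pvIntervalFilter _ _ _ (-m) (m+1) rfl]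
      have he1 : max (-m) (max (-(m - |x|)) (-py)) = max (-(m - |x|)) (-py) := by omega
      have he2 : min (m+1) (min (m - |x|) (sy - 1 - py) + 1) = min (m - |x|) (sy - 1 - py) + 1 := by omega
      rw [he1, he2]
      apply List.map_congr_left
      intro y _
      rw [hpf]
      simp only
      rcases lt_or_ge y 0 with h | h
      · rw [if_neg (by omega), abs_of_neg h]
      · rw [if_pos h, abs_of_nonneg h]
  · -- column out of bounds: both sides empty
    rw [hBblock]
    simp only [if_neg hxok]
    rw [List.map_eq_nil_iff, List.filter_eq_nil_iff]
    intro y _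
    simp only [hpf, Bool.and_eq_true, decide_eq_true_eq]
    rintro ⟨hb, -⟩
    exact hxok ⟨hb.1.1, hb.1.2⟩

-- ===== VERDICT (by name: the statement is the Claim_ definition above) =====
theorem get_tiles_within_distance_spec : Claim_equal_get_tiles_within_distance := by
  intro pos m size _
  unfold Spec_get_tiles_within_distance
  exact get_tiles_within_distance_eq pos m size
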